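-- pv_equiv track=rewrite | github.com/tobiasperel/IntroALaProgramacion | guias/guia7python/guia7.py | eliminarRepetidos
-- ===== SOURCE A (Python) =====
-- def eliminarRepetidos(s:str) -> str :
--     resultado = ''
--     for i in range(len(s)):
--         letra_repetida = False
--         for j in range(i+1, len(s)):
--             if s[i] == s[j] :
--                 letra_repetida = True
--                 break
--         if letra_repetida == False:
--             resultado += s[i]
--     return resultado
-- ===== SOURCE B (Python) =====
-- def eliminarRepetidos(s: str) -> str:
--     # Single reverse pass: keep each character's last occurrence.
--     seen = set()
--     acc = []
--     for c in reversed(s):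
--         if c not in seen:
--             seen.add(c)
--             acc.append(c)
--     return ''.join(reversed(acc))
-- ===== Notes on version B (the rewrite author's own statement) =====
-- stated objective: faster
-- what changed: Replaces the quadratic per-index lookahead scan with a single reverse pass that tracks already-seen characters in a set and reverses the accumulator at the end.
import Mathlib
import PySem

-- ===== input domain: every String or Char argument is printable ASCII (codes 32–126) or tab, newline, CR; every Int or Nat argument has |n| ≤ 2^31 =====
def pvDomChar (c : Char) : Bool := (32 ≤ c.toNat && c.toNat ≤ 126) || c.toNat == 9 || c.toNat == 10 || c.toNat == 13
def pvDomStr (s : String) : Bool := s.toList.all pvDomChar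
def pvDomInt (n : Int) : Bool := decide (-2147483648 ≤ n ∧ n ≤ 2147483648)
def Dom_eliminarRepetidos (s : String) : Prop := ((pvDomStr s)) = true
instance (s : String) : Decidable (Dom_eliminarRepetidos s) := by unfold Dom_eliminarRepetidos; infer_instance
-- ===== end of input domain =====

-- B replaces A's quadratic per-index lookahead with one reverse pass over the string
-- tracking seen characters in a set (objective: faster).

-- ===== PORT A =====
-- inner 'for j in range(i+1, len(s)): if s[i] == s[j]: letra_repetida = True; break'
def pvInnerA (cs : List Char) (ci : Char) : List Int → Bool
  | [] => false
  | j :: js =>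
    match PySem.List.pyGet? cs j with
    | some cj => if ci == cj then true else pvInnerA cs ci js
    | none => false   -- unreachable: j is always in range

def eliminarRepetidos (s : String) : String :=
  String.mk ((PySem.List.pyRange 0 (s.toList.length : Int) 1).foldl (fun resultado i =>
    match PySem.List.pyGet? s.toList i with
    | some ci =>
      if pvInnerA s.toList ci (PySem.List.pyRange (i + 1) (s.toList.length : Int) 1) then resultado
      else resultado ++ [ci]
    | none => resultado) [])

-- ===== PORT B =====
def pvStepB (st : PySem.Set Char × List Char) (c : Char) : PySem.Set Char × List Char :=
  if PySem.Set.contains st.1 c then st else (PySem.Set.add st.1 c, st.2 ++ [c])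

def eliminarRepetidos_alt (s : String) : String :=
  String.mk ((s.toList.reverse.foldl pvStepB (PySem.Set.empty, [])).2.reverse)

-- ===== PRECONDITION & SPEC =====
def Spec_eliminarRepetidos (s : String) (out : String) : Prop := out = eliminarRepetidos_alt s
instance (s : String) (out : String) : Decidable (Spec_eliminarRepetidos s out) := by unfold Spec_eliminarRepetidos; infer_instance

-- ===== CLAIM (what is proved, stated in full; the proofs are below) =====
def Claim_equal_eliminarRepetidos : Prop := ∀ (s : String), Dom_eliminarRepetidos s → Spec_eliminarRepetidos s (eliminarRepetidos s)

-- ===== LEMMAS AND PROOFS =====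

-- characterisation both ports are proved equal to: keep a char iff it does not recur later
def pvLastOcc : List Char → List Char
  | [] => []
  | c :: t => if c ∈ t then pvLastOcc t else c :: pvLastOcc t

theorem pvInnerA_spec (cs : List Char) (c : Char) (m : Nat) :
    ∀ k : Nat, cs.length - k = m →
      pvInnerA cs c (PySem.List.pyRange (k : Int) (cs.length : Int) 1) = decide (c ∈ cs.drop k) := by
  induction m with
  | zero =>
    intro k hk
    have hge : cs.length ≤ k := by omega
    rw [PySem.List.pyRange_one_eq_nil (by exact_mod_cast hge)]
    simp [pvInnerA, List.drop_eq_nil_of_le hge]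
  | succ m ih =>
    intro k hk
    have hlt : k < cs.length := by omega
    rw [PySem.List.pyRange_one_cons (by exact_mod_cast hlt)]
    have hdrop : cs.drop k = cs[k] :: cs.drop (k + 1) := List.drop_eq_getElem_cons hlt
    have hget : PySem.List.pyGet? cs (k : Int) = some cs[k] := by
      simp [PySem.List.pyGet?_natCast, List.getElem?_eq_getElem hlt]
    have hcast : ((k : Int) + 1) = ((k + 1 : Nat) : Int) := by push_cast; ring
    simp only [pvInnerA, hget, hcast, ih (k + 1) (by omega), hdrop]
    by_cases h : c = cs[k]
    · simp only [h, beq_self_eq_true, if_true, List.mem_cons, true_or, decide_true]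
    · simp only [List.mem_cons, h, false_or]
      rw [if_neg (by simpa using h)]

theorem pvOuterA_spec (cs : List Char) (m : Nat) :
    ∀ (k : Nat) (res : List Char), cs.length - k = m →
      (PySem.List.pyRange (k : Int) (cs.length : Int) 1).foldl (fun resultado i =>
        match PySem.List.pyGet? cs i with
        | some ci =>
          if pvInnerA cs ci (PySem.List.pyRange (i + 1) (cs.length : Int) 1) then resultado
          else resultado ++ [ci]
        | none => resultado) res = res ++ pvLastOcc (cs.drop k) := by
  induction m with
  | zero =>
    intro k res hk
    have hge : cs.length ≤ k := by omega
    rw [PySem.List.pyRange_one_eq_nil (by exact_mod_cast hge)]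
    simp [List.drop_eq_nil_of_le hge, pvLastOcc]
  | succ m ih =>
    intro k res hk
    have hlt : k < cs.length := by omega
    rw [PySem.List.pyRange_one_cons (by exact_mod_cast hlt)]
    have hdrop : cs.drop k = cs[k] :: cs.drop (k + 1) := List.drop_eq_getElem_cons hlt
    have hget : PySem.List.pyGet? cs (k : Int) = some cs[k] := by
      simp [PySem.List.pyGet?_natCast, List.getElem?_eq_getElem hlt]
    have hcast : ((k : Int) + 1) = ((k + 1 : Nat) : Int) := by push_cast; ring
    simp only [List.foldl_cons, hget, hcast,
      pvInnerA_spec cs cs[k] (cs.length - (k + 1)) (k + 1) rfl]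
    rw [ih (k + 1) _ (by omega), hdrop]
    by_cases h : cs[k] ∈ cs.drop (k + 1) <;> simp [pvLastOcc, h]

theorem eliminarRepetidos_eq_lastOcc (s : String) :
    eliminarRepetidos s = String.mk (pvLastOcc s.toList) := by
  unfold eliminarRepetidos
  rw [show ((0 : Int) = ((0 : Nat) : Int)) from rfl,
    pvOuterA_spec s.toList s.toList.length 0 [] (by omega)]
  simp

-- B's loop invariant: after processing l.reverse, the seen set holds exactly l's
-- characters and the accumulator is pvLastOcc l reversed.
theorem pvLoopB_spec (l : List Char) :
    (∀ c, PySem.Set.contains ((l.reverse.foldl pvStepB (PySem.Set.empty, [])).1) c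
        = decide (c ∈ l)) ∧
    ((l.reverse.foldl pvStepB (PySem.Set.empty, [])).2).reverse = pvLastOcc l := by
  induction l with
  | nil => simp [PySem.Set.empty, PySem.Set.contains, pvLastOcc]
  | cons c t ih =>
    obtain ⟨ihseen, ihacc⟩ := ih
    rw [show (c :: t).reverse = t.reverse ++ [c] by simp, List.foldl_append]
    simp only [List.foldl_cons, List.foldl_nil]
    generalize hP : List.foldl pvStepB (PySem.Set.empty, []) t.reverse = P at ihseen ihacc ⊢
    have hmem : ∀ c', c' ∈ P.1 ↔ c' ∈ t := fun c' => by simpa using ihseen c'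
    have ihacc' : P.2 = (pvLastOcc t).reverse := by rw [← ihacc]; simp
    by_cases h : c ∈ t
    · constructor
      · intro c'
        simp only [pvStepB, PySem.Set.contains, List.contains_iff_mem, hmem c, h,
          if_true]
        by_cases hc : c' = c <;> simp [hmem c', List.mem_cons, hc, h, (hmem c).2 h]
      · simp only [pvStepB, PySem.Set.contains, List.contains_iff_mem, hmem c, h,
          if_true, ihacc, pvLastOcc]
    · have hnc : c ∉ P.1 := fun hc => h ((hmem c).1 hc)
      constructor
      · intro c'
        simp only [pvStepB, PySem.Set.contains, PySem.Set.add, List.contains_iff_mem,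
          hnc, if_false]
        simp [hmem c', List.mem_cons, or_comm]
      · simp only [pvStepB, PySem.Set.contains, PySem.Set.add, List.contains_iff_mem,
          hnc, if_false]
        simp [pvLastOcc, h, ihacc']

theorem eliminarRepetidos_alt_eq_lastOcc (s : String) :
    eliminarRepetidos_alt s = String.mk (pvLastOcc s.toList) := by
  unfold eliminarRepetidos_alt
  rw [(pvLoopB_spec s.toList).2]

-- ===== VERDICT (by name: the statement is the Claim_ definition above) =====
theorem eliminarRepetidos_spec : Claim_equal_eliminarRepetidos := by
  intro s _
  unfold Spec_eliminarRepetidos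
  rw [eliminarRepetidos_eq_lastOcc, eliminarRepetidos_alt_eq_lastOcc]
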